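-- pv_equiv track=rewrite | github.com/paulklemstine/factor | research_field_10_rep_sn.py | action_cycle_structure
-- ===== SOURCE A (Python) =====
-- import time, math, random
--
-- def action_cycle_structure(N, perm_size=None):
--     """Study the cycle structure of the multiplication-by-a map on Z/NZ.
--     For a in (Z/NZ)*, the map x -> ax mod N is a permutation.
--     Its cycle type (as an element of S_N) encodes factor information.
--     """
--     if perm_size is None:
--         perm_size = N
--
--     results = {}
--     for a in range(2, min(20, N)):
--         if math.gcd(a, N) != 1:
--             continue
--         # Find cycle structure of x -> ax mod N
--         visited = set()
--         cycles = []
--         for start in range(N):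
--             if start in visited:
--                 continue
--             cycle = []
--             x = start
--             while x not in visited:
--                 visited.add(x)
--                 cycle.append(x)
--                 x = (a * x) % N
--             if len(cycle) > 0:
--                 cycles.append(len(cycle))
--
--         cycle_type = tuple(sorted(cycles, reverse=True))
--         results[a] = cycle_type
--
--     return results
-- ===== SOURCE B (Python) =====
-- import math
--
-- def action_cycle_structure(N, perm_size=None):
--     """Divisor-class algorithm: the orbit of x under x -> a*x mod N stays inside the
--     class {y : gcd(y, N) = gcd(x, N)} and has length ord(a mod N//gcd(x, N)); so one
--     gcd histogram of 0..N-1 plus one multiplicative-order walk per distinct gcd value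
--     yields the whole cycle type, with no per-element orbit traversal."""
--     if perm_size is None:
--         perm_size = N
--
--     gcd_count = {}
--     for x in range(N):
--         g = math.gcd(x, N)
--         gcd_count[g] = gcd_count.get(g, 0) + 1
--
--     results = {}
--     for a in range(2, min(20, N)):
--         if math.gcd(a, N) != 1:
--             continue
--         lengths = []
--         for g, c in gcd_count.items():
--             m = N // g
--             p = 1
--             y = a % m
--             while y != 1 % m:
--                 y = (a * y) % m
--                 p += 1
--             lengths.extend([p] * (c // p))
--         results[a] = tuple(sorted(lengths, reverse=True))
--     return results
-- ===== Notes on version B (the rewrite author's own statement) =====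
-- stated objective: faster
-- what changed: B replaces A's per-a orbit sweep with a visited set by a single gcd histogram of 0..N-1 plus, per unit a and per distinct gcd class g, one multiplicative-order walk mod N//g: a class of c elements consists of c//ord cycles of length ord, so no element's orbit is ever traversed.
import Mathlib
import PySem

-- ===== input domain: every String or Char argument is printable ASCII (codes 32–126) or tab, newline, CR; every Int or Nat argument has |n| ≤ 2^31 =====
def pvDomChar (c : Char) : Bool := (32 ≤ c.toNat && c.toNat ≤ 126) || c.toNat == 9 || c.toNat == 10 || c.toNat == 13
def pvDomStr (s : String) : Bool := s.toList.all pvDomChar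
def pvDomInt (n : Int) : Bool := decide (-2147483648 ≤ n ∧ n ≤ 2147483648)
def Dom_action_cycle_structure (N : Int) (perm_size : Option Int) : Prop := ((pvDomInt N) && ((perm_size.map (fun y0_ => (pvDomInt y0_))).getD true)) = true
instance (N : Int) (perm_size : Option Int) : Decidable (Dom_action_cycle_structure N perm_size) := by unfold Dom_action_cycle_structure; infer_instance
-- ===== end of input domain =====

-- B replaces A's per-a orbit sweep with a visited set by one gcd histogram of 0..N-1 plus one
-- multiplicative-order walk mod N//g per unit a and per distinct gcd value g: a class of c
-- elements splits into c//ord cycles of length ord (objective: a different, faster algorithm).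

-- ===== PORT A =====
-- inner while loop of A: while x not in visited: visited.add(x); cycle.append(x); x = (a*x) % N
def acsWalk (N a : Int) : Nat → PySem.Set Int → List Int → Int → PySem.Set Int × List Int
  | 0, visited, cycle, _ => (visited, cycle)
  | fuel + 1, visited, cycle, x =>
    if visited.contains x then (visited, cycle)
    else acsWalk N a fuel (visited.add x) (cycle ++ [x]) (PySem.Int.mod (a * x) N)

def action_cycle_structure (N : Int) (perm_size : Option Int) : List (Int × List Int) :=
  let _perm_size : Int := perm_size.getD N
  let results : PySem.Dict Int (List Int) :=
    (PySem.List.pyRange 2 (min 20 N)).foldl (fun results a =>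
      if (Int.gcd a N : Int) ≠ 1 then results
      else
        let st := (PySem.List.pyRange 0 N).foldl (fun (st : PySem.Set Int × List Int) start =>
          if st.1.contains start then st
          else
            let w := acsWalk N a (N.toNat + 1) st.1 [] start
            if PySem.List.len w.2 > 0 then (w.1, st.2 ++ [PySem.List.len w.2]) else (w.1, st.2))
          (PySem.Set.empty, [])
        results.insert a (PySem.List.sorted st.2 (fun x => x) true)) PySem.Dict.empty
  results.items

-- ===== PORT B =====
-- B's order walk: p = 1; y = a % m; while y != 1 % m: y = (a*y) % m; p += 1
def acsOrdLoop (m a : Int) : Nat → Int → Int → Int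
  | 0, _, p => p
  | fuel + 1, y, p =>
    if y ≠ PySem.Int.mod 1 m then acsOrdLoop m a fuel (PySem.Int.mod (a * y) m) (p + 1) else p

def action_cycle_structure_alt (N : Int) (perm_size : Option Int) : List (Int × List Int) :=
  let _perm_size : Int := perm_size.getD N
  let gcd_count : PySem.Dict Int Int :=
    (PySem.List.pyRange 0 N).foldl (fun d x =>
      let g : Int := Int.gcd x N
      d.insert g (d.getD g 0 + 1)) PySem.Dict.empty
  let results : PySem.Dict Int (List Int) :=
    (PySem.List.pyRange 2 (min 20 N)).foldl (fun results a =>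
      if (Int.gcd a N : Int) ≠ 1 then results
      else
        let lengths := gcd_count.items.foldl (fun (lengths : List Int) gc =>
          let m := PySem.Int.floordiv N gc.1
          let p := acsOrdLoop m a (m.toNat + 1) (PySem.Int.mod a m) 1
          lengths ++ PySem.List.pyRepeat [p] (PySem.Int.floordiv gc.2 p)) []
        results.insert a (PySem.List.sorted lengths (fun x => x) true)) PySem.Dict.empty
  results.items

-- ===== PRECONDITION & SPEC =====
def Spec_action_cycle_structure (N : Int) (perm_size : Option Int) (out : List (Int × List Int)) : Prop := out = action_cycle_structure_alt N perm_size
instance (N : Int) (perm_size : Option Int) (out : List (Int × List Int)) : Decidable (Spec_action_cycle_structure N perm_size out) := by unfold Spec_action_cycle_structure; infer_instance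

-- ===== CLAIM (what is proved, stated in full; the proofs are below) =====
def Claim_equal_action_cycle_structure : Prop := ∀ (N : Int) (perm_size : Option Int), Dom_action_cycle_structure N perm_size → Spec_action_cycle_structure N perm_size (action_cycle_structure N perm_size)

-- ===== LEMMAS AND PROOFS =====

-- the multiplication map, its iterates, period (cycle length) and orbit, for the proof
def pvG (N a x : Int) : Int := (a * x) % N
def pvIt (N a : Int) (k : Nat) (s : Int) : Int := (pvG N a)^[k] s
def pvInR (N y : Int) : Prop := 0 ≤ y ∧ y < N
abbrev pvHasPer (N a s : Int) : Prop := ∃ l : Nat, l ≤ N.toNat ∧ 0 < l ∧ pvIt N a l s = s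
def pvL (N a s : Int) : Nat :=
  if h : pvHasPer N a s then
    Nat.find (p := fun l => 0 < l ∧ pvIt N a l s = s) ⟨h.choose, h.choose_spec.2⟩ else 0
def pvOrb (N a s z : Int) : Prop := ∃ k, k < pvL N a s ∧ pvIt N a k s = z

-- s is the minimum of its own cycle
def pvMinB (N a s : Int) : Bool := decide (∀ k, k < pvL N a s → s ≤ pvIt N a k s)

lemma pvG_range (N a x : Int) (hN : 0 < N) : pvInR N (pvG N a x) := by
  exact ⟨Int.emod_nonneg _ (by omega), Int.emod_lt_of_pos _ hN⟩

lemma pvIt_range (N a : Int) (hN : 0 < N) (k : Nat) (s : Int) (hs : pvInR N s) :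
    pvInR N (pvIt N a k s) := by
  induction k with
  | zero => exact hs
  | succ k ih =>
    rw [pvIt, Function.iterate_succ_apply']
    exact pvG_range N a _ hN

lemma pvIt_succ' (N a : Int) (k : Nat) (s : Int) :
    pvIt N a (k + 1) s = pvG N a (pvIt N a k s) := by
  rw [pvIt, Function.iterate_succ_apply']; rfl

lemma pvIt_add (N a : Int) (i j : Nat) (s : Int) :
    pvIt N a (i + j) s = pvIt N a i (pvIt N a j s) := by
  rw [pvIt, Function.iterate_add_apply]; rfl

lemma pvG_inj (N a x y : Int) (hN : 0 < N) (ha : Int.gcd a N = 1)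
    (hx : pvInR N x) (hy : pvInR N y) (h : pvG N a x = pvG N a y) : x = y := by
  have h0 : (a * x - a * y) % N = 0 := by
    rw [← Int.emod_eq_emod_iff_emod_sub_eq_zero]; exact h
  have hd : N ∣ a * (x - y) := by
    have := Int.dvd_of_emod_eq_zero h0
    rwa [show a * x - a * y = a * (x - y) by ring] at this
  have hco : IsCoprime (N : Int) a := (Int.isCoprime_iff_gcd_eq_one.mpr ha).symm
  obtain ⟨c, hc⟩ := hco.dvd_of_dvd_mul_left hd
  obtain ⟨hx0, hx1⟩ := hx; obtain ⟨hy0, hy1⟩ := hy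
  rcases lt_trichotomy c 0 with hcs | hcs | hcs
  · nlinarith
  · rw [hcs, mul_zero] at hc; omega
  · nlinarith

lemma pvIt_cancel (N a : Int) (hN : 0 < N) (ha : Int.gcd a N = 1) (k : Nat) (x y : Int)
    (hx : pvInR N x) (hy : pvInR N y) (h : pvIt N a k x = pvIt N a k y) : x = y := by
  induction k with
  | zero => exact h
  | succ k ih =>
    rw [pvIt_succ', pvIt_succ'] at h
    exact ih (pvG_inj N a _ _ hN ha (pvIt_range N a hN k x hx) (pvIt_range N a hN k y hy) h)

lemma pvHasPer_of (N a s : Int) (hN : 0 < N) (ha : Int.gcd a N = 1) (hs : pvInR N s) :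
    pvHasPer N a s := by
  have hmt : Set.MapsTo (fun k => pvIt N a k s) ↑(Finset.range (N.toNat + 1))
      ↑(Finset.Ico (0 : Int) N) := by
    intro k _
    have := pvIt_range N a hN k s hs
    simpa [Finset.mem_Ico, pvInR] using this
  have hcard : (Finset.Ico (0 : Int) N).card < (Finset.range (N.toNat + 1)).card := by
    rw [Int.card_Ico, Finset.card_range]; omega
  obtain ⟨i, hi, j, hj, hne, heq⟩ := Finset.exists_ne_map_eq_of_card_lt_of_maps_to hcard hmt
  simp only [Finset.mem_range] at hi hj
  rcases Nat.lt_or_ge i j with hij | hge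
  case _ =>
    refine ⟨j - i, by omega, by omega, ?_⟩
    have hadd : pvIt N a j s = pvIt N a i (pvIt N a (j - i) s) := by
      rw [← pvIt_add]; congr 1; omega
    exact pvIt_cancel N a hN ha i _ _ (pvIt_range N a hN _ s hs) hs (by rw [← hadd, ← heq])
  case _ =>
    have hij : j < i := by omega
    refine ⟨i - j, by omega, by omega, ?_⟩
    have hadd : pvIt N a i s = pvIt N a j (pvIt N a (i - j) s) := by
      rw [← pvIt_add]; congr 1; omega
    exact pvIt_cancel N a hN ha j _ _ (pvIt_range N a hN _ s hs) hs (by rw [← hadd, heq])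

lemma pvL_le_of (N a s : Int) (h : pvHasPer N a s) (l : Nat) (hl0 : 0 < l)
    (hit : pvIt N a l s = s) : pvL N a s ≤ l := by
  rw [pvL, dif_pos h]
  exact Nat.find_min' _ ⟨hl0, hit⟩

lemma pvL_spec (N a s : Int) (h : pvHasPer N a s) :
    0 < pvL N a s ∧ pvIt N a (pvL N a s) s = s := by
  rw [pvL, dif_pos h]
  exact Nat.find_spec (p := fun l => 0 < l ∧ pvIt N a l s = s) ⟨h.choose, h.choose_spec.2⟩

lemma pvL_min (N a s : Int) (h : pvHasPer N a s) (k : Nat) (hk0 : 0 < k) (hk : k < pvL N a s) :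
    pvIt N a k s ≠ s := by
  intro he
  have := Nat.find_min (p := fun l => 0 < l ∧ pvIt N a l s = s)
    ⟨h.choose, h.choose_spec.2⟩ (by rw [pvL, dif_pos h] at hk; exact hk)
  exact this ⟨hk0, he⟩

lemma pvL_le (N a s : Int) (h : pvHasPer N a s) : pvL N a s ≤ N.toNat := by
  rw [pvL, dif_pos h]
  exact Nat.find_min' _ ⟨h.choose_spec.2.1, h.choose_spec.2.2⟩ |>.trans h.choose_spec.1

lemma pvIt_distinct (N a s : Int) (hN : 0 < N) (ha : Int.gcd a N = 1) (hs : pvInR N s)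
    (i j : Nat) (hij : i < j) (hj : j < pvL N a s) : pvIt N a i s ≠ pvIt N a j s := by
  intro he
  have hper := pvHasPer_of N a s hN ha hs
  have hadd : pvIt N a j s = pvIt N a i (pvIt N a (j - i) s) := by
    rw [← pvIt_add]; congr 1; omega
  have hcan : s = pvIt N a (j - i) s :=
    (pvIt_cancel N a hN ha i _ _ hs (pvIt_range N a hN _ s hs) (by rw [← hadd, he]))
  exact pvL_min N a s hper (j - i) (by omega) (by omega) hcan.symm

lemma pvIt_comm (N a : Int) (i j : Nat) (x : Int) :
    pvIt N a i (pvIt N a j x) = pvIt N a j (pvIt N a i x) := by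
  rw [← pvIt_add, Nat.add_comm, pvIt_add]

lemma pvIt_mul_add (N a s : Int) (h : pvHasPer N a s) (q r : Nat) :
    pvIt N a (q * pvL N a s + r) s = pvIt N a r s := by
  induction q with
  | zero => simp
  | succ q ih =>
    have : (q + 1) * pvL N a s + r = (q * pvL N a s + r) + pvL N a s := by ring
    rw [this, pvIt_add, (pvL_spec N a s h).2, ih]

lemma pvIt_mod (N a s : Int) (h : pvHasPer N a s) (n : Nat) :
    pvIt N a n s = pvIt N a (n % pvL N a s) s := by
  conv_lhs => rw [show n = pvL N a s * (n / pvL N a s) + n % pvL N a s from (Nat.div_add_mod n _).symm]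
  rw [Nat.mul_comm, pvIt_mul_add N a s h]

lemma pvOrb_L_eq (N a s z : Int) (hN : 0 < N) (ha : Int.gcd a N = 1) (hs : pvInR N s)
    (h : pvOrb N a s z) : pvL N a z = pvL N a s := by
  obtain ⟨k, hk, hkz⟩ := h
  have hper := pvHasPer_of N a s hN ha hs
  have hLpos := (pvL_spec N a s hper).1
  have hzper : pvIt N a (pvL N a s) z = z := by
    rw [← hkz, pvIt_comm, (pvL_spec N a s hper).2]
  have hzHas : pvHasPer N a z := ⟨pvL N a s, pvL_le N a s hper, hLpos, hzper⟩
  have h1 : pvL N a z ≤ pvL N a s := pvL_le_of N a z hzHas _ hLpos hzper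
  have hsper : pvIt N a (pvL N a z) s = s := by
    have hs' : pvIt N a (pvL N a s - k) z = s := by
      rw [← hkz, ← pvIt_add, show pvL N a s - k + k = pvL N a s by omega, (pvL_spec N a s hper).2]
    calc pvIt N a (pvL N a z) s = pvIt N a (pvL N a z) (pvIt N a (pvL N a s - k) z) := by rw [hs']
    _ = pvIt N a (pvL N a s - k) (pvIt N a (pvL N a z) z) := pvIt_comm N a _ _ z
    _ = pvIt N a (pvL N a s - k) z := by rw [(pvL_spec N a z hzHas).2]
    _ = s := hs'
  have h2 : pvL N a s ≤ pvL N a z :=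
    pvL_le_of N a s hper _ (pvL_spec N a z hzHas).1 hsper
  omega

lemma pvOrb_range (N a s z : Int) (hN : 0 < N) (hs : pvInR N s) (h : pvOrb N a s z) :
    pvInR N z := by
  obtain ⟨k, _, hk⟩ := h; exact hk ▸ pvIt_range N a hN k s hs

lemma pvOrb_self (N a s : Int) (hN : 0 < N) (ha : Int.gcd a N = 1) (hs : pvInR N s) :
    pvOrb N a s s :=
  ⟨0, (pvL_spec N a s (pvHasPer_of N a s hN ha hs)).1, rfl⟩

lemma pvOrb_symm (N a s z : Int) (hN : 0 < N) (ha : Int.gcd a N = 1) (hs : pvInR N s)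
    (h : pvOrb N a s z) : pvOrb N a z s := by
  have hLz := pvOrb_L_eq N a s z hN ha hs h
  obtain ⟨k, hk, hkz⟩ := h
  have hper := pvHasPer_of N a s hN ha hs
  rcases Nat.eq_zero_or_pos k with hk0 | hk0
  · subst hk0
    exact hkz ▸ pvOrb_self N a s hN ha hs
  · refine ⟨pvL N a s - k, by omega, ?_⟩
    rw [← hkz, ← pvIt_add, show pvL N a s - k + k = pvL N a s by omega, (pvL_spec N a s hper).2]

lemma pvOrb_trans (N a s z w : Int) (hN : 0 < N) (ha : Int.gcd a N = 1) (hs : pvInR N s)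
    (h1 : pvOrb N a s z) (h2 : pvOrb N a z w) : pvOrb N a s w := by
  have hLz := pvOrb_L_eq N a s z hN ha hs h1
  have hper := pvHasPer_of N a s hN ha hs
  obtain ⟨k, hk, hkz⟩ := h1
  obtain ⟨m, hm, hmw⟩ := h2
  rw [hLz] at hm
  refine ⟨(m + k) % pvL N a s, Nat.mod_lt _ (pvL_spec N a s hper).1, ?_⟩
  rw [← pvIt_mod N a s hper, pvIt_add, hkz, hmw]

-- the prefix of the orbit of s, in traversal order
def pvPref (N a s : Int) (j : Nat) : List Int := (List.range j).map (fun k => pvIt N a k s)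

lemma pvPref_succ (N a s : Int) (j : Nat) :
    pvPref N a s (j + 1) = pvPref N a s j ++ [pvIt N a j s] := by
  simp [pvPref, List.range_succ]

lemma mem_pvPref (N a s y : Int) (j : Nat) :
    y ∈ pvPref N a s j ↔ ∃ k, k < j ∧ pvIt N a k s = y := by
  simp [pvPref, eq_comm]

lemma acsWalk_spec (N a : Int) (hN : 0 < N) (ha : Int.gcd a N = 1) (s : Int) (hs : pvInR N s)
    (V : PySem.Set Int) (hdisj : ∀ z, pvOrb N a s z → z ∉ V) :
    ∀ fuel j (c0 : List Int), j ≤ pvL N a s → pvL N a s - j < fuel →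
    acsWalk N a fuel (V ++ pvPref N a s j) (c0 ++ pvPref N a s j) (pvIt N a j s)
      = (V ++ pvPref N a s (pvL N a s), c0 ++ pvPref N a s (pvL N a s)) := by
  have hper := pvHasPer_of N a s hN ha hs
  intro fuel
  induction fuel with
  | zero => intro j c0 hj hf; omega
  | succ fuel ih =>
    intro j c0 hj hf
    rcases eq_or_lt_of_le hj with hEq | hLt
    · subst hEq
      rw [acsWalk, if_pos]
      rw [PySem.Set.contains_iff]
      refine List.mem_append.mpr (Or.inr ?_)
      rw [mem_pvPref]
      exact ⟨0, (pvL_spec N a s hper).1, ((pvL_spec N a s hper).2).symm⟩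
    · have hx : pvIt N a j s ∉ V ++ pvPref N a s j := by
        intro hmem
        rcases List.mem_append.mp hmem with hv | hp
        · exact hdisj _ ⟨j, hLt, rfl⟩ hv
        · obtain ⟨k, hk, hks⟩ := (mem_pvPref N a s _ j).mp hp
          exact pvIt_distinct N a s hN ha hs k j hk hLt hks
      rw [acsWalk, if_neg (by rw [PySem.Set.contains_iff]; exact hx)]
      have hadd : (V ++ pvPref N a s j).add (pvIt N a j s) = V ++ pvPref N a s (j + 1) := by
        rw [PySem.Set.add_of_not_mem hx, pvPref_succ, List.append_assoc]
      have hcyc : (c0 ++ pvPref N a s j) ++ [pvIt N a j s] = c0 ++ pvPref N a s (j + 1) := by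
        rw [pvPref_succ, List.append_assoc]
      have hstep : PySem.Int.mod (a * pvIt N a j s) N = pvIt N a (j + 1) s := by
        rw [PySem.Int.mod_eq_emod_of_pos hN, pvIt_succ']; rfl
      rw [hadd, hcyc, hstep]
      exact ih (j + 1) c0 (by omega) (by omega)

lemma acsWalk_run (N a : Int) (hN : 0 < N) (ha : Int.gcd a N = 1) (s : Int) (hs : pvInR N s)
    (V : PySem.Set Int) (hdisj : ∀ z, pvOrb N a s z → z ∉ V) :
    acsWalk N a (N.toNat + 1) V [] s
      = (V ++ pvPref N a s (pvL N a s), pvPref N a s (pvL N a s)) := by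
  have h := acsWalk_spec N a hN ha s hs V hdisj (N.toNat + 1) 0 [] (Nat.zero_le _)
    (by have := pvL_le N a s (pvHasPer_of N a s hN ha hs); omega)
  simpa [pvPref, pvIt] using h

-- ===== A's per-a loop collects the cycle length at each cycle minimum =====
lemma acsLoopA_eq (N a : Int) (hN : 0 < N) (ha : Int.gcd a N = 1) :
    ∀ (n : Nat) (s0 : Int), 0 ≤ s0 → (N - s0).toNat = n →
    ∀ (V : PySem.Set Int) (acc : List Int),
    (∀ y : Int, y ∈ V ↔ (pvInR N y ∧ ∃ k, k < pvL N a y ∧ pvIt N a k y < s0)) →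
    ((PySem.List.pyRange s0 N).foldl (fun (st : PySem.Set Int × List Int) start =>
        if st.1.contains start then st
        else
          if PySem.List.len (acsWalk N a (N.toNat + 1) st.1 [] start).2 > 0 then
            ((acsWalk N a (N.toNat + 1) st.1 [] start).1,
              st.2 ++ [PySem.List.len (acsWalk N a (N.toNat + 1) st.1 [] start).2])
          else ((acsWalk N a (N.toNat + 1) st.1 [] start).1, st.2))
      (V, acc)).2
    = acc ++ ((PySem.List.pyRange s0 N).filter (fun s => pvMinB N a s)).map
        (fun s => ((pvL N a s : Nat) : Int)) := by
  intro n
  induction n with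
  | zero =>
    intro s0 hs0 hn V acc hInv
    rw [PySem.List.pyRange_one_eq_nil (by omega)]
    simp
  | succ n ih =>
    intro s0 hs0 hn V acc hInv
    have hlt : s0 < N := by omega
    have hs0R : pvInR N s0 := ⟨hs0, hlt⟩
    have hper := pvHasPer_of N a s0 hN ha hs0R
    rw [PySem.List.pyRange_one_cons hlt, List.foldl_cons, List.filter_cons]
    by_cases hvis : ∃ k, k < pvL N a s0 ∧ pvIt N a k s0 < s0
    · -- s0 already lies on a previously counted cycle: A skips it, it is not its cycle's min
      have hmem : s0 ∈ V := (hInv s0).mpr ⟨hs0R, hvis⟩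
      have hcA : PySem.Set.contains V s0 = true := (PySem.Set.contains_iff V s0).mpr hmem
      have hminF : pvMinB N a s0 = false := by
        obtain ⟨k, hk, hks⟩ := hvis
        simp only [pvMinB, decide_eq_false_iff_not]
        intro h; exact absurd (h k hk) (by omega)
      rw [if_pos hcA, hminF]
      simp only [Bool.false_eq_true, if_false]
      refine ih (s0 + 1) (by omega) (by omega) V acc ?_
      intro y
      rw [hInv y]
      constructor
      · rintro ⟨hyR, k, hkL, hky⟩
        exact ⟨hyR, k, hkL, by omega⟩
      · rintro ⟨hyR, k, hkL, hky⟩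
        refine ⟨hyR, ?_⟩
        rcases lt_or_eq_of_le (by omega : pvIt N a k y ≤ s0) with h | h
        · exact ⟨k, hkL, h⟩
        · obtain ⟨j, hjL, hj⟩ := hvis
          have horb : pvOrb N a y (pvIt N a j s0) :=
            pvOrb_trans N a y s0 _ hN ha hyR ⟨k, hkL, h⟩ ⟨j, hjL, rfl⟩
          obtain ⟨k', hk', hk'e⟩ := horb
          exact ⟨k', hk', by omega⟩
    · -- s0 is the minimum of a fresh cycle: A walks it and appends its length
      have hmin : ∀ k, k < pvL N a s0 → s0 ≤ pvIt N a k s0 := by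
        intro k hk
        by_contra hcon
        exact hvis ⟨k, hk, by omega⟩
      have hminT : pvMinB N a s0 = true := by
        simp only [pvMinB, decide_eq_true_eq]; exact hmin
      have hnmem : s0 ∉ V := fun h => hvis ((hInv s0).mp h).2
      have hcA : PySem.Set.contains V s0 = false :=
        Bool.eq_false_iff.mpr fun h => hnmem ((PySem.Set.contains_iff V s0).mp h)
      have hdisj : ∀ z, pvOrb N a s0 z → z ∉ V := by
        intro z hz hzV
        obtain ⟨hzR, k, hkLz, hklt⟩ := (hInv z).mp hzV
        have horb : pvOrb N a s0 (pvIt N a k z) :=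
          pvOrb_trans N a s0 z _ hN ha hs0R hz ⟨k, hkLz, rfl⟩
        obtain ⟨j, hj, hje⟩ := horb
        exact absurd (hmin j hj) (by omega)
      rw [if_neg (by rw [hcA]; exact Bool.false_ne_true)]
      have hrunA := acsWalk_run N a hN ha s0 hs0R V hdisj
      have hlen : PySem.List.len (pvPref N a s0 (pvL N a s0)) = ((pvL N a s0 : Nat) : Int) := by
        rw [PySem.List.len_eq]; simp [pvPref]
      simp only [hrunA, hlen, hminT, if_pos trivial]
      rw [if_pos (by exact_mod_cast (pvL_spec N a s0 hper).1)]
      rw [ih (s0 + 1) (by omega) (by omega) (V ++ pvPref N a s0 (pvL N a s0))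
        (acc ++ [((pvL N a s0 : Nat) : Int)]) ?_]
      · rw [List.map_cons, List.append_assoc]; rfl
      · intro y
        rw [List.mem_append, hInv y, mem_pvPref]
        constructor
        · rintro (⟨hyR, k, hkL, hky⟩ | horb)
          · exact ⟨hyR, k, hkL, by omega⟩
          · have horb' : pvOrb N a s0 y := horb
            have hyR := pvOrb_range N a s0 y hN hs0R horb'
            obtain ⟨k, hkLy, hke⟩ := pvOrb_symm N a s0 y hN ha hs0R horb'
            exact ⟨hyR, k, hkLy, by omega⟩
        · rintro ⟨hyR, k, hkL, hky⟩
          rcases lt_or_eq_of_le (by omega : pvIt N a k y ≤ s0) with h | h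
          · exact Or.inl ⟨hyR, k, hkL, h⟩
          · exact Or.inr (pvOrb_symm N a y s0 hN ha hyR ⟨k, hkL, h⟩)

-- ===== number theory: the period of x is the multiplicative order of a mod N/gcd(x,N) =====
lemma pvIt_eq_pow (N a : Int) (hN : 0 < N) (x : Int) (hx : pvInR N x) (k : Nat) :
    pvIt N a k x = (a ^ k * x) % N := by
  induction k with
  | zero => simpa [pvIt] using (Int.emod_eq_of_lt hx.1 hx.2).symm
  | succ k ih =>
    rw [pvIt_succ', ih, pvG, Int.mul_emod a ((a ^ k * x) % N) N,
      Int.emod_emod_of_dvd _ dvd_rfl, ← Int.mul_emod]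
    congr 1; ring

lemma pvPeriod_iff (N a x : Int) (hN : 0 < N) (hx : pvInR N x) (k : Nat) :
    pvIt N a k x = x ↔ (N / (Int.gcd x N : Int)) ∣ a ^ k - 1 := by
  have hgN : ((Int.gcd x N : Nat) : Int) ∣ N := Int.gcd_dvd_right x N
  have hgx : ((Int.gcd x N : Nat) : Int) ∣ x := Int.gcd_dvd_left x N
  have hgpos : 0 < Int.gcd x N := Int.gcd_pos_iff.mpr (Or.inr (by omega))
  have hg0 : (0 : Int) < ((Int.gcd x N : Nat) : Int) := by exact_mod_cast hgpos
  have hcop : Int.gcd (x / ((Int.gcd x N : Nat) : Int)) (N / ((Int.gcd x N : Nat) : Int)) = 1 :=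
    Int.gcd_div_gcd_div_gcd hgpos
  have hmN : (N / ((Int.gcd x N : Nat) : Int)) * ((Int.gcd x N : Nat) : Int) = N :=
    Int.ediv_mul_cancel hgN
  have hx' : (x / ((Int.gcd x N : Nat) : Int)) * ((Int.gcd x N : Nat) : Int) = x :=
    Int.ediv_mul_cancel hgx
  have h1 : pvIt N a k x = x ↔ N ∣ x * (a ^ k - 1) := by
    rw [pvIt_eq_pow N a hN x hx k]
    constructor
    · intro h
      have h2 : (a ^ k * x) % N = x % N := by rw [h, Int.emod_eq_of_lt hx.1 hx.2]
      have h3 := Int.emod_eq_emod_iff_emod_sub_eq_zero.mp h2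
      have := Int.dvd_of_emod_eq_zero h3
      rwa [show a ^ k * x - x = x * (a ^ k - 1) by ring] at this
    · intro h
      have h3 : (a ^ k * x - x) % N = 0 := by
        rw [show a ^ k * x - x = x * (a ^ k - 1) by ring]
        exact Int.emod_eq_zero_of_dvd h
      have h2 := Int.emod_eq_emod_iff_emod_sub_eq_zero.mpr h3
      rwa [Int.emod_eq_of_lt hx.1 hx.2] at h2
  rw [h1]
  constructor
  · intro h
    have h2 : (N / ((Int.gcd x N : Nat) : Int)) * ((Int.gcd x N : Nat) : Int)
        ∣ ((x / ((Int.gcd x N : Nat) : Int)) * (a ^ k - 1)) * ((Int.gcd x N : Nat) : Int) := by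
      rw [hmN]
      have : (x / ((Int.gcd x N : Nat) : Int)) * (a ^ k - 1) * ((Int.gcd x N : Nat) : Int)
          = x * (a ^ k - 1) := by rw [show (x / ((Int.gcd x N : Nat) : Int)) * (a ^ k - 1) * ((Int.gcd x N : Nat) : Int) = ((x / ((Int.gcd x N : Nat) : Int)) * ((Int.gcd x N : Nat) : Int)) * (a ^ k - 1) by ring, hx']
      rwa [this]
    have h3 : (N / ((Int.gcd x N : Nat) : Int)) ∣ (x / ((Int.gcd x N : Nat) : Int)) * (a ^ k - 1) :=
      (mul_dvd_mul_iff_right (by omega : ((Int.gcd x N : Nat) : Int) ≠ 0)).mp h2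
    have hco : IsCoprime (N / ((Int.gcd x N : Nat) : Int)) (x / ((Int.gcd x N : Nat) : Int)) :=
      Int.isCoprime_iff_gcd_eq_one.mpr (by rw [Int.gcd_comm]; exact hcop)
    exact hco.dvd_of_dvd_mul_left h3
  · intro h
    have h3 : (N / ((Int.gcd x N : Nat) : Int)) ∣ (x / ((Int.gcd x N : Nat) : Int)) * (a ^ k - 1) :=
      Dvd.dvd.mul_left h _
    have h2 := mul_dvd_mul_right h3 ((Int.gcd x N : Nat) : Int)
    rw [hmN] at h2
    rwa [show (x / ((Int.gcd x N : Nat) : Int)) * (a ^ k - 1) * ((Int.gcd x N : Nat) : Int)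
        = ((x / ((Int.gcd x N : Nat) : Int)) * ((Int.gcd x N : Nat) : Int)) * (a ^ k - 1) by ring,
      hx'] at h2

lemma pvL_eq_of_gcd (N a x y : Int) (hN : 0 < N) (ha : Int.gcd a N = 1)
    (hx : pvInR N x) (hy : pvInR N y) (hg : Int.gcd x N = Int.gcd y N) :
    pvL N a x = pvL N a y := by
  have hpx := pvHasPer_of N a x hN ha hx
  have hpy := pvHasPer_of N a y hN ha hy
  have hgi : (Int.gcd x N : Int) = (Int.gcd y N : Int) := by exact_mod_cast hg
  have h1 : pvL N a x ≤ pvL N a y :=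
    pvL_le_of N a x hpx _ (pvL_spec N a y hpy).1
      ((pvPeriod_iff N a x hN hx _).mpr (by
        rw [hgi]; exact (pvPeriod_iff N a y hN hy _).mp (pvL_spec N a y hpy).2))
  have h2 : pvL N a y ≤ pvL N a x :=
    pvL_le_of N a y hpy _ (pvL_spec N a x hpx).1
      ((pvPeriod_iff N a y hN hy _).mpr (by
        rw [← hgi]; exact (pvPeriod_iff N a x hN hx _).mp (pvL_spec N a x hpx).2))
  omega

lemma gcd_mul_unit (a c N : Int) (ha : Int.gcd a N = 1) :
    Int.gcd (a * c) N = Int.gcd c N := by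
  unfold Int.gcd
  rw [Int.natAbs_mul]
  exact Nat.Coprime.gcd_mul_left_cancel _ ha

lemma gcd_pvIt (N a x : Int) (hN : 0 < N) (ha : Int.gcd a N = 1) (k : Nat) :
    Int.gcd (pvIt N a k x) N = Int.gcd x N := by
  induction k with
  | zero => rfl
  | succ k ih =>
    rw [pvIt_succ', pvG, Int.gcd_emod, gcd_mul_unit a _ N ha, ih]

-- the order walk of B returns the period of any point of the class
lemma acsOrdLoop_run (m a : Int) (hm : 0 < m) (L : Nat) (hL : 0 < L)
    (hstop : m ∣ a ^ L - 1) (hmin : ∀ j, 0 < j → j < L → ¬ m ∣ a ^ j - 1) :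
    ∀ fuel j, 1 ≤ j → j ≤ L → L - j < fuel →
    acsOrdLoop m a fuel (a ^ j % m) ((j : Nat) : Int) = ((L : Nat) : Int) := by
  intro fuel
  induction fuel with
  | zero => intro j h1 hj hf; omega
  | succ fuel ih =>
    intro j h1 hj hf
    rcases eq_or_lt_of_le hj with hEq | hLt
    · subst hEq
      have hy : a ^ j % m = 1 % m :=
        Int.emod_eq_emod_iff_emod_sub_eq_zero.mpr (Int.emod_eq_zero_of_dvd hstop)
      rw [acsOrdLoop, if_neg (by rw [PySem.Int.mod_eq_emod_of_pos hm]; simpa using hy)]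
    · have hy : a ^ j % m ≠ 1 % m := by
        intro he
        exact hmin j (by omega) hLt
          (Int.dvd_of_emod_eq_zero (Int.emod_eq_emod_iff_emod_sub_eq_zero.mp he))
      rw [acsOrdLoop, if_pos (by rw [PySem.Int.mod_eq_emod_of_pos hm]; simpa using hy)]
      have hstep : PySem.Int.mod (a * (a ^ j % m)) m = a ^ (j + 1) % m := by
        rw [PySem.Int.mod_eq_emod_of_pos hm, Int.mul_emod a (a ^ j % m) m,
          Int.emod_emod_of_dvd _ dvd_rfl, ← Int.mul_emod]
        congr 1; ring
      have hsucc : ((j : Nat) : Int) + 1 = (((j + 1 : Nat) : Nat) : Int) := by push_cast; ring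
      rw [hstep, hsucc]
      exact ih (j + 1) (by omega) (by omega) (by omega)

def pvW (N a g : Int) : Int :=
  acsOrdLoop (PySem.Int.floordiv N g) a ((PySem.Int.floordiv N g).toNat + 1)
    (PySem.Int.mod a (PySem.Int.floordiv N g)) 1

lemma pvW_eq (N a x : Int) (hN : 0 < N) (ha : Int.gcd a N = 1) (hx : pvInR N x) :
    pvW N a ((Int.gcd x N : Nat) : Int) = ((pvL N a x : Nat) : Int) := by
  have hgN : ((Int.gcd x N : Nat) : Int) ∣ N := Int.gcd_dvd_right x N
  have hgpos : 0 < Int.gcd x N := Int.gcd_pos_iff.mpr (Or.inr (by omega))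
  have hg0 : (0 : Int) < ((Int.gcd x N : Nat) : Int) := by exact_mod_cast hgpos
  have hmN : (N / ((Int.gcd x N : Nat) : Int)) * ((Int.gcd x N : Nat) : Int) = N :=
    Int.ediv_mul_cancel hgN
  have hm : 0 < N / ((Int.gcd x N : Nat) : Int) := by
    by_contra hc
    nlinarith [le_of_not_gt hc]
  have hper := pvHasPer_of N a x hN ha hx
  have hL0 := (pvL_spec N a x hper).1
  have hstop : (N / ((Int.gcd x N : Nat) : Int)) ∣ a ^ (pvL N a x) - 1 :=
    (pvPeriod_iff N a x hN hx _).mp (pvL_spec N a x hper).2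
  have hmin : ∀ j, 0 < j → j < pvL N a x → ¬ (N / ((Int.gcd x N : Nat) : Int)) ∣ a ^ j - 1 := by
    intro j hj0 hjL hdvd
    exact pvL_min N a x hper j hj0 hjL ((pvPeriod_iff N a x hN hx _).mpr hdvd)
  have hmdvd : (N / ((Int.gcd x N : Nat) : Int)) ∣ N := ⟨((Int.gcd x N : Nat) : Int), hmN.symm⟩
  have hLle : pvL N a x ≤ (N / ((Int.gcd x N : Nat) : Int)).toNat := by
    rcases eq_or_lt_of_le (by omega : (1 : Int) ≤ N / ((Int.gcd x N : Nat) : Int)) with h1 | h1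
    · have hd1 : (N / ((Int.gcd x N : Nat) : Int)) ∣ a ^ 1 - 1 := by
        rw [← h1]; exact one_dvd _
      have := pvL_le_of N a x hper 1 one_pos ((pvPeriod_iff N a x hN hx 1).mpr hd1)
      omega
    · have h1R : pvInR (N / ((Int.gcd x N : Nat) : Int)) 1 := ⟨by omega, by omega⟩
      have ham : Int.gcd a (N / ((Int.gcd x N : Nat) : Int)) = 1 :=
        Nat.Coprime.coprime_dvd_right (Int.natAbs_dvd_natAbs.mpr hmdvd) ha
      obtain ⟨l, hlm, hl0, hlper⟩ := pvHasPer_of _ a 1 hm ham h1R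
      have hpow : pvIt (N / ((Int.gcd x N : Nat) : Int)) a l 1 = a ^ l % (N / ((Int.gcd x N : Nat) : Int)) := by
        rw [pvIt_eq_pow _ a hm 1 h1R l, mul_one]
      have hdl : (N / ((Int.gcd x N : Nat) : Int)) ∣ a ^ l - 1 := by
        have he : a ^ l % (N / ((Int.gcd x N : Nat) : Int)) = 1 % (N / ((Int.gcd x N : Nat) : Int)) := by
          rw [← hpow, hlper, Int.emod_eq_of_lt (by omega) (by omega)]
        exact Int.dvd_of_emod_eq_zero (Int.emod_eq_emod_iff_emod_sub_eq_zero.mp he)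
      have := pvL_le_of N a x hper l hl0 ((pvPeriod_iff N a x hN hx l).mpr hdl)
      omega
  have hrun := acsOrdLoop_run (N / ((Int.gcd x N : Nat) : Int)) a hm (pvL N a x) hL0 hstop hmin
    ((N / ((Int.gcd x N : Nat) : Int)).toNat + 1) 1 le_rfl hL0 (by omega)
  rw [pvW, PySem.Int.floordiv_eq_ediv_of_pos hg0]
  have hentry : PySem.Int.mod a (N / ((Int.gcd x N : Nat) : Int))
      = a ^ 1 % (N / ((Int.gcd x N : Nat) : Int)) := by
    rw [PySem.Int.mod_eq_emod_of_pos hm, pow_one]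
  rw [hentry]
  simpa using hrun

-- ===== counting: a gcd class of c elements consists of c / L cycles of length L =====
def orbFin (N a s : Int) : Finset Int := (Finset.range (pvL N a s)).image (fun k => pvIt N a k s)

lemma mem_orbFin (N a s z : Int) : z ∈ orbFin N a s ↔ pvOrb N a s z := by
  simp [orbFin, pvOrb]

lemma card_orbFin (N a s : Int) (hN : 0 < N) (ha : Int.gcd a N = 1) (hs : pvInR N s) :
    (orbFin N a s).card = pvL N a s := by
  rw [orbFin, Finset.card_image_of_injOn, Finset.card_range]
  intro i hi j hj hij
  simp only [Finset.coe_range, Set.mem_Iio] at hi hj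
  by_contra hne
  rcases Nat.lt_or_ge i j with h | h
  · exact pvIt_distinct N a s hN ha hs i j h hj hij
  · exact pvIt_distinct N a s hN ha hs j i (by omega) hi hij.symm

lemma exists_min_orb (N a x : Int) (hN : 0 < N) (ha : Int.gcd a N = 1) (hx : pvInR N x) :
    ∃ s, pvOrb N a x s ∧ pvMinB N a s = true := by
  have hne : (orbFin N a x).Nonempty := ⟨x, (mem_orbFin N a x x).mpr (pvOrb_self N a x hN ha hx)⟩
  refine ⟨(orbFin N a x).min' hne, (mem_orbFin N a x _).mp (Finset.min'_mem _ _), ?_⟩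
  have hxs : pvOrb N a x ((orbFin N a x).min' hne) := (mem_orbFin N a x _).mp (Finset.min'_mem _ _)
  rw [pvMinB, decide_eq_true_eq]
  intro k hk
  have horb : pvOrb N a x (pvIt N a k ((orbFin N a x).min' hne)) :=
    pvOrb_trans N a x _ _ hN ha hx hxs ⟨k, hk, rfl⟩
  exact Finset.min'_le _ _ ((mem_orbFin N a x _).mpr horb)

lemma class_card (N a g x₀ : Int) (hN : 0 < N) (ha : Int.gcd a N = 1)
    (hx₀ : pvInR N x₀) (hg : ((Int.gcd x₀ N : Nat) : Int) = g) :
    (PySem.List.pyRange 0 N).countP (fun x => ((Int.gcd x N : Nat) : Int) == g)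
      = pvL N a x₀ *
        (PySem.List.pyRange 0 N).countP
          (fun s => pvMinB N a s && (((Int.gcd s N : Nat) : Int) == g)) := by
  have hnd := PySem.List.nodup_pyRange_one 0 N
  have bridge : ∀ p : Int → Bool, (PySem.List.pyRange 0 N).countP p
      = ((PySem.List.pyRange 0 N).toFinset.filter (fun x => p x = true)).card := by
    intro p
    rw [List.countP_eq_length_filter, ← List.toFinset_card_of_nodup (hnd.filter p),
      List.toFinset_filter]
  have hmemF : ∀ z : Int, z ∈ (PySem.List.pyRange 0 N).toFinset ↔ pvInR N z := by
    intro z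
    rw [List.mem_toFinset, PySem.List.mem_pyRange_one]
    exact Iff.rfl
  have hgcd_orb : ∀ s z : Int, pvOrb N a s z → Int.gcd z N = Int.gcd s N := by
    intro s z h
    obtain ⟨k, _, hke⟩ := h
    rw [← hke, gcd_pvIt N a s hN ha k]
  have hbi : (PySem.List.pyRange 0 N).toFinset.filter
        (fun x => ((((Int.gcd x N : Nat) : Int) == g) = true))
      = ((PySem.List.pyRange 0 N).toFinset.filter
          (fun s => ((pvMinB N a s && (((Int.gcd s N : Nat) : Int) == g)) = true))).biUnion
          (orbFin N a) := by
    ext z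
    simp only [Finset.mem_filter, Finset.mem_biUnion, beq_iff_eq, Bool.and_eq_true]
    constructor
    · rintro ⟨hzF, hzg⟩
      have hzR : pvInR N z := (hmemF z).mp hzF
      obtain ⟨s, horb, hsmin⟩ := exists_min_orb N a z hN ha hzR
      have hsR : pvInR N s := pvOrb_range N a z s hN hzR horb
      refine ⟨s, ⟨(hmemF s).mpr hsR, hsmin, ?_⟩, ?_⟩
      · rw [← hzg]
        exact_mod_cast congrArg (fun t => ((t : Nat) : Int)) (hgcd_orb z s horb)
      · exact (mem_orbFin N a s z).mpr (pvOrb_symm N a z s hN ha hzR horb)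
    · rintro ⟨s, ⟨hsF, hsmin, hsg⟩, hzorb⟩
      have horb : pvOrb N a s z := (mem_orbFin N a s z).mp hzorb
      have hsR : pvInR N s := (hmemF s).mp hsF
      refine ⟨(hmemF z).mpr (pvOrb_range N a s z hN hsR horb), ?_⟩
      rw [← hsg]
      exact_mod_cast congrArg (fun t => ((t : Nat) : Int)) (hgcd_orb s z horb)
  have hdisj : (↑((PySem.List.pyRange 0 N).toFinset.filter
        (fun s => ((pvMinB N a s && (((Int.gcd s N : Nat) : Int) == g)) = true))) : Set Int).PairwiseDisjoint
        (orbFin N a) := by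
    intro s hs t ht hst
    simp only [Finset.coe_filter, Set.mem_setOf_eq, Bool.and_eq_true, beq_iff_eq] at hs ht
    obtain ⟨hsF, hsmin, hsg⟩ := hs
    obtain ⟨htF, htmin, htg⟩ := ht
    have hsR : pvInR N s := (hmemF s).mp hsF
    have htR : pvInR N t := (hmemF t).mp htF
    rw [Function.onFun, Finset.disjoint_left]
    intro z hzs hzt
    have horbs : pvOrb N a s z := (mem_orbFin N a s z).mp hzs
    have horbt : pvOrb N a t z := (mem_orbFin N a t z).mp hzt
    have hst' : pvOrb N a s t :=
      pvOrb_trans N a s z t hN ha hsR horbs (pvOrb_symm N a t z hN ha htR horbt)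
    have hts' : pvOrb N a t s := pvOrb_symm N a s t hN ha hsR hst'
    have h1 : s ≤ t := by
      obtain ⟨k, hk, hke⟩ := hst'
      have := (decide_eq_true_eq.mp hsmin) k hk
      omega
    have h2 : t ≤ s := by
      obtain ⟨k, hk, hke⟩ := hts'
      have := (decide_eq_true_eq.mp htmin) k hk
      omega
    exact hst (by omega)
  rw [bridge, bridge, hbi, Finset.card_biUnion hdisj]
  trans (∑ _u ∈ (PySem.List.pyRange 0 N).toFinset.filter
      (fun s => ((pvMinB N a s && (((Int.gcd s N : Nat) : Int) == g)) = true)), pvL N a x₀)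
  · apply Finset.sum_congr rfl
    intro s hs
    simp only [Finset.mem_filter, Bool.and_eq_true, beq_iff_eq] at hs
    obtain ⟨hsF, hsmin, hsg⟩ := hs
    have hsR : pvInR N s := (hmemF s).mp hsF
    have hgeq : Int.gcd s N = Int.gcd x₀ N := by
      have h : ((Int.gcd s N : Nat) : Int) = ((Int.gcd x₀ N : Nat) : Int) := by rw [hsg, hg]
      exact_mod_cast h
    rw [card_orbFin N a s hN ha hsR, pvL_eq_of_gcd N a s x₀ hN ha hsR hx₀ hgeq]
  · rw [Finset.sum_const, smul_eq_mul, mul_comm]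

-- ===== list-level summation helpers =====
lemma sum_map_add_nat (D : List Int) (f h : Int → Nat) :
    (D.map (fun g => f g + h g)).sum = (D.map f).sum + (D.map h).sum := by
  induction D with
  | nil => simp
  | cons d D ih => simp [ih]; omega

lemma sum_map_single (D : List Int) (hD : D.Nodup) (v : Int) (hv : v ∈ D) (c : Int → Nat) :
    (D.map (fun g => if v == g then c g else 0)).sum = c v := by
  induction D with
  | nil => cases hv
  | cons d D ih =>
    rcases List.mem_cons.mp hv with h | h
    · subst h
      have hnm : v ∉ D := (List.nodup_cons.mp hD).1
      have hz : (D.map (fun g => if v == g then c g else 0)).sum = 0 := by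
        apply List.sum_eq_zero
        intro x hx
        obtain ⟨gg, hgg, hge⟩ := List.mem_map.mp hx
        have : ¬ (v == gg) = true := by
          intro hb
          rw [beq_iff_eq] at hb
          exact hnm (hb ▸ hgg)
        rw [← hge, if_neg this]
      simp only [List.map_cons, List.sum_cons, hz, beq_self_eq_true, if_true]
      omega
    · have hd : ¬ (v == d) = true := by
        intro hb; rw [beq_iff_eq] at hb; exact (List.nodup_cons.mp hD).1 (hb ▸ h)
      simp only [List.map_cons, List.sum_cons, if_neg hd, Nat.zero_add]
      exact ih (List.nodup_cons.mp hD).2 h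

lemma countP_partition (key : Int → Int) (p : Int → Bool) :
    ∀ (S D : List Int), D.Nodup → (∀ s ∈ S, key s ∈ D) →
    S.countP p = (D.map (fun g => S.countP (fun s => p s && (key s == g)))).sum := by
  intro S
  induction S with
  | nil =>
    intro D _ _
    simp [List.countP_nil]
  | cons x S ih =>
    intro D hD hcov
    rw [List.countP_cons]
    have hmc : (D.map (fun g => (x :: S).countP (fun s => p s && (key s == g))))
        = D.map (fun g => S.countP (fun s => p s && (key s == g))
            + if (p x && (key x == g)) = true then 1 else 0) := by
      apply List.map_congr_left
      intro g _
      rw [List.countP_cons]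
    rw [hmc, sum_map_add_nat,
      ← ih D hD (fun s hs => hcov s (List.mem_cons_of_mem _ hs))]
    congr 1
    by_cases hp : p x = true
    · have : (D.map (fun g => if (p x && (key x == g)) = true then 1 else 0))
          = D.map (fun g => if key x == g then (fun _ => 1) g else 0) := by
        apply List.map_congr_left; intro g _; simp [hp]
      rw [this, sum_map_single D hD (key x) (hcov x (List.mem_cons_self)) (fun _ => 1)]
      simp [hp]
    · have : (D.map (fun g => if (p x && (key x == g)) = true then 1 else 0))
          = D.map (fun _ => 0) := by
        apply List.map_congr_left; intro g _
        simp [Bool.eq_false_iff.mpr hp]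
      rw [this]
      simp [Bool.eq_false_iff.mpr hp]

-- ===== per-a equality of the two length multisets, hence of the sorted lists =====
lemma sorted_rev_eq_of_perm (l₁ l₂ : List Int) (h : l₁.Perm l₂) :
    PySem.List.sorted l₁ (fun x => x) true = PySem.List.sorted l₂ (fun x => x) true := by
  apply PySem.List.eq_of_perm_of_pairwise_le_of_injective (key := fun x : Int => -x)
    (fun u w huw => by simpa using huw)
  · exact (PySem.List.sorted_perm l₁ _ _).trans (h.trans (PySem.List.sorted_perm l₂ _ _).symm)
  · exact (PySem.List.sorted_pairwise_rev l₁ _).imp (fun h => by omega)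
  · exact (PySem.List.sorted_pairwise_rev l₂ _).imp (fun h => by omega)

lemma perA_count (N a : Int) (hN : 0 < N) (ha : Int.gcd a N = 1) (v : Int) :
    (((PySem.List.pyRange 0 N).filter (fun s => pvMinB N a s)).map
        (fun s => ((pvL N a s : Nat) : Int))).count v
      = ((PySem.Set.ofList ((PySem.List.pyRange 0 N).map (fun x => ((Int.gcd x N : Nat) : Int)))).flatMap
          (fun g => List.replicate
            (PySem.Int.floordiv
              ((((PySem.List.pyRange 0 N).map (fun x => ((Int.gcd x N : Nat) : Int))).count g : Nat) : Int)
              (pvW N a g)).toNat (pvW N a g))).count v := by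
  rw [List.count_eq_countP, List.countP_map, List.countP_filter, List.count_flatMap]
  have hL : List.countP
        (fun s => ((fun t => t == v) ∘ fun s => ((pvL N a s : Nat) : Int)) s && pvMinB N a s)
        (PySem.List.pyRange 0 N)
      = ((PySem.Set.ofList ((PySem.List.pyRange 0 N).map (fun x => ((Int.gcd x N : Nat) : Int)))).map
          (fun g => List.countP
            (fun s => ((((pvL N a s : Nat) : Int) == v) && pvMinB N a s)
              && (((Int.gcd s N : Nat) : Int) == g)) (PySem.List.pyRange 0 N))).sum :=
    countP_partition (fun s => ((Int.gcd s N : Nat) : Int))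
      (fun s => (((pvL N a s : Nat) : Int) == v) && pvMinB N a s)
      (PySem.List.pyRange 0 N) _
      (PySem.Set.nodup_ofList _)
      (fun s hs => (PySem.Set.mem_ofList _ _).mpr (List.mem_map_of_mem hs))
  rw [hL]
  apply congrArg List.sum
  apply List.map_congr_left
  intro g hg
  obtain ⟨x₀, hx₀S, hkey⟩ := List.mem_map.mp ((PySem.Set.mem_ofList _ _).mp hg)
  have hx₀R : pvInR N x₀ := PySem.List.mem_pyRange_one.mp hx₀S
  have hpw : pvW N a g = ((pvL N a x₀ : Nat) : Int) := by
    rw [← hkey]; exact pvW_eq N a x₀ hN ha hx₀R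
  have hL0 : 0 < pvL N a x₀ := (pvL_spec N a x₀ (pvHasPer_of N a x₀ hN ha hx₀R)).1
  have hGc : ((PySem.List.pyRange 0 N).map (fun x => ((Int.gcd x N : Nat) : Int))).count g
      = List.countP (fun x => (((Int.gcd x N : Nat) : Int) == g)) (PySem.List.pyRange 0 N) := by
    rw [List.count_eq_countP, List.countP_map]; rfl
  have hcc := class_card N a g x₀ hN ha hx₀R hkey
  have hLconst : ∀ s ∈ PySem.List.pyRange 0 N, (((Int.gcd s N : Nat) : Int) == g) = true →
      pvL N a s = pvL N a x₀ := by
    intro s hs hsg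
    rw [beq_iff_eq] at hsg
    have hgeq : Int.gcd s N = Int.gcd x₀ N := by
      have h : ((Int.gcd s N : Nat) : Int) = ((Int.gcd x₀ N : Nat) : Int) := by rw [hsg, hkey]
      exact_mod_cast h
    exact pvL_eq_of_gcd N a s x₀ hN ha (PySem.List.mem_pyRange_one.mp hs) hx₀R hgeq
  simp only [Function.comp_apply, List.count_replicate]
  by_cases hv : ((pvL N a x₀ : Nat) : Int) = v
  · rw [if_pos (by rw [hpw, hv]; exact beq_self_eq_true v)]
    have hA : List.countP
        (fun s => ((((pvL N a s : Nat) : Int) == v) && pvMinB N a s)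
          && (((Int.gcd s N : Nat) : Int) == g)) (PySem.List.pyRange 0 N)
        = List.countP (fun s => pvMinB N a s && (((Int.gcd s N : Nat) : Int) == g))
            (PySem.List.pyRange 0 N) := by
      apply List.countP_congr
      intro s hs
      by_cases hsg : (((Int.gcd s N : Nat) : Int) == g) = true
      · have := hLconst s hs hsg
        simp [hsg, this, hv]
      · simp [Bool.eq_false_iff.mpr hsg]
    rw [hA, hGc, hcc, hpw, PySem.Int.floordiv_natCast,
      Nat.mul_div_cancel_left _ hL0, Int.toNat_natCast]
  · rw [if_neg (by rw [hpw]; simpa using hv)]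
    apply List.countP_eq_zero.mpr
    intro s hs
    simp only [Bool.and_eq_true, beq_iff_eq]
    rintro ⟨⟨hpv, _⟩, hsg⟩
    exact hv (by
      rw [← hLconst s hs (by rw [beq_iff_eq]; exact hsg)] at *
      exact hpv)

lemma hist_eq (N : Int) :
    (PySem.List.pyRange 0 N).foldl
      (fun d x => d.insert ((Int.gcd x N : Nat) : Int) (d.getD ((Int.gcd x N : Nat) : Int) 0 + 1))
      PySem.Dict.empty
    = PySem.Dict.counter ((PySem.List.pyRange 0 N).map (fun x => ((Int.gcd x N : Nat) : Int))) := by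
  rw [← PySem.Dict.foldl_insert_getD_add_one_eq_counter, List.foldl_map]

lemma perA_eq (N a : Int) (hN : 0 < N) (ha : Int.gcd a N = 1) :
    PySem.List.sorted
      (((PySem.List.pyRange 0 N).filter (fun s => pvMinB N a s)).map
        (fun s => ((pvL N a s : Nat) : Int))) (fun x => x) true
    = PySem.List.sorted
      ((PySem.Set.ofList ((PySem.List.pyRange 0 N).map (fun x => ((Int.gcd x N : Nat) : Int)))).flatMap
          (fun g => List.replicate
            (PySem.Int.floordiv
              ((((PySem.List.pyRange 0 N).map (fun x => ((Int.gcd x N : Nat) : Int))).count g : Nat) : Int)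
              (pvW N a g)).toNat (pvW N a g))) (fun x => x) true := by
  exact sorted_rev_eq_of_perm _ _ (List.perm_iff_count.mpr (perA_count N a hN ha))

-- ===== VERDICT (by name: the statement is the Claim_ definition above) =====
theorem action_cycle_structure_spec : Claim_equal_action_cycle_structure := by
  intro N ps _
  unfold Spec_action_cycle_structure action_cycle_structure action_cycle_structure_alt
  dsimp only
  congr 1
  apply PySem.List.foldl_congr_mem
  intro acc a hx
  obtain ⟨ha2, haN⟩ := PySem.List.mem_pyRange_one.mp hx
  have hN : 0 < N := by
    have := lt_of_lt_of_le haN (min_le_right 20 N); omega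
  by_cases hg : (Int.gcd a N : Int) ≠ 1
  · rw [if_pos hg, if_pos hg]
  · rw [if_neg hg, if_neg hg]
    have hga : Int.gcd a N = 1 := by exact_mod_cast not_not.mp hg
    have hA := acsLoopA_eq N a hN hga (N - 0).toNat 0 le_rfl rfl PySem.Set.empty [] (by
      intro y
      simp only [PySem.Set.empty, List.not_mem_nil, false_iff]
      rintro ⟨hyR, k, hk, hky⟩
      have := (pvIt_range N a hN k y hyR).1
      omega)
    rw [hA]
    rw [PySem.List.foldl_append_eq_flatMap, hist_eq N, PySem.Dict.items_counter,
      List.flatMap_map]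
    simp only [PySem.List.pyRepeat_singleton, List.nil_append]
    exact congrArg _ (perA_eq N a hN hga)
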